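-- pv_equiv track=rewrite | github.com/Magret7/Software-Engineering | Diplomacy (Game)/Diplomacy.py | city_with_armies
-- ===== SOURCE A (Python) =====
-- def city_with_armies(current_standing):
--     """
--     Current_standing is list of the curent army and it location
--     Will find the cities with more than 2 armies and army battleing
--     Return cities_with_armies & battling
--     """
--     # Creating dictionary with cities and the number of armies in each
--     city_army = {}
--     for army_city in current_standing:
--         # Read entry one at a time
--         city = army_city[1:]
--         city = "".join(city.split())
--         # If city not found in dictonary, add it in and set number of armies to 0
--         if city not in city_army:
--             city_army[city] = 0
--         # Update count of Army in City
--         city_army[city] += 1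
--
--     # Finding cities with more than 2 armies
--     cities_with_armies = []
--     for city, army_count in city_army.items():
--         if army_count >= 2:
--             cities_with_armies.append(city)
--
--     battling = []
--     for x in current_standing:
--         city = x[1:]
--         city = "".join(city.split())
--         army = x[0:]
--         if city in cities_with_armies:
--             battling.append(army)
--     # Returning the cities with more than 2 armies and armies in that city
--     return(cities_with_armies, battling)
-- ===== SOURCE B (Python) =====
-- def city_with_armies(current_standing):
--     # Sort-then-scan: the duplicated city keys are exactly the adjacent equal
--     # pairs of the sorted key list; one fused pass then builds both outputs.
--     keys = ["".join(s[1:].split()) for s in current_standing]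
--     sk = sorted(keys)
--     dup = {a for a, b in zip(sk, sk[1:]) if a == b}
--     cities_with_armies = []
--     battling = []
--     for x, k in zip(current_standing, keys):
--         if k in dup:
--             battling.append(x)
--             if k not in cities_with_armies:
--                 cities_with_armies.append(k)
--     return (cities_with_armies, battling)
-- ===== Notes on version B (the rewrite author's own statement) =====
-- stated objective: alternative
-- what changed: B replaces A's counting dictionary and its two separate output loops with sort-then-scan duplicate detection: it sorts the normalized keys, reads the duplicated keys off adjacent equal pairs of the sorted list, and builds both result lists in one fused pass over the input.
import Mathlib
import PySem

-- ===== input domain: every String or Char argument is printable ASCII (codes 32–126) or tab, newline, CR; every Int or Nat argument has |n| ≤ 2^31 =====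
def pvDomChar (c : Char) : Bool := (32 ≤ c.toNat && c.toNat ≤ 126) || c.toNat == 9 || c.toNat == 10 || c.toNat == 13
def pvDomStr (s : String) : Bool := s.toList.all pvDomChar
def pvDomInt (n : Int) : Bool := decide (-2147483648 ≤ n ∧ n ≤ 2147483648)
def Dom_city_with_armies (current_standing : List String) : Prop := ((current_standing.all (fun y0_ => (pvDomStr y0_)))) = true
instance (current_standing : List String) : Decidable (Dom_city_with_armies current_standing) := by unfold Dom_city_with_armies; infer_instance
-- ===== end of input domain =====

-- B replaces A's counting dictionary and its two output loops by sorting the keys, reading the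
-- duplicated keys off the adjacent equal pairs, and one fused output pass; objective: alternative.

-- shared helper: "".join(s[1:].split())  (both Pythons compute this normalization)
def pvNormCity (s : String) : String :=
  PySem.Str.join "" (PySem.Str.split₀ (PySem.Str.slice s (some 1) none))

-- ===== PORT A =====
def city_with_armies (current_standing : List String) : List String × List String :=
  let city_army : PySem.Dict String Int :=
    current_standing.foldl (fun d army_city =>
      let city := pvNormCity army_city
      let d := if (d.get? city).isNone then d.insert city 0 else d   -- if city not in city_army: city_army[city] = 0
      d.modify city 0 (· + 1)) PySem.Dict.empty                      -- city_army[city] += 1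
  let cities_with_armies : List String :=
    city_army.items.foldl (fun acc p => if (2:Int) ≤ p.2 then acc ++ [p.1] else acc) []
  let battling : List String :=
    current_standing.foldl (fun acc x =>
      let city := pvNormCity x
      let army := x                                                  -- army = x[0:] (a copy; identity for immutable strings)
      if cities_with_armies.contains city then acc ++ [army] else acc) []
  (cities_with_armies, battling)

-- ===== PORT B =====
def city_with_armies_alt (current_standing : List String) : List String × List String :=
  let keys := current_standing.map pvNormCity
  let sk := PySem.List.sorted keys (fun k => k) false                -- sk = sorted(keys)
  let dup : PySem.Set String :=                                      -- {a for a, b in zip(sk, sk[1:]) if a == b}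
    PySem.Set.ofList (((sk.zip sk.tail).filter (fun p => p.1 == p.2)).map Prod.fst)
  (current_standing.zip keys).foldl
    (fun (st : List String × List String) xk =>
      if PySem.Set.contains dup xk.2 then                            -- if k in dup
        (if st.1.contains xk.2 then st.1 else st.1 ++ [xk.2],
         st.2 ++ [xk.1])
      else st)
    ([], [])

-- ===== PRECONDITION & SPEC =====
def Spec_city_with_armies (current_standing : List String) (out : List String × List String) : Prop := out = city_with_armies_alt current_standing
instance (current_standing : List String) (out : List String × List String) : Decidable (Spec_city_with_armies current_standing out) := by unfold Spec_city_with_armies; infer_instance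

-- ===== CLAIM (what is proved, stated in full; the proofs are below) =====
def Claim_equal_city_with_armies : Prop := ∀ (current_standing : List String), Dom_city_with_armies current_standing → Spec_city_with_armies current_standing (city_with_armies current_standing)

-- ===== LEMMAS AND PROOFS =====

-- ordered dedup of a list relative to an already-seen list
def pvDedupFrom (seen : List String) : List String → List String
  | [] => []
  | k :: ks => if seen.contains k then pvDedupFrom seen ks else k :: pvDedupFrom (seen ++ [k]) ks

-- a generic fused-output loop body, named for the induction
def pvStepB (q : String → Bool) (f : String → String)
    (st : List String × List String) (x : String) : List String × List String :=
  if q (f x) = true then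
    if st.1.contains (f x) then (st.1, st.2 ++ [x])
    else (st.1 ++ [f x], st.2 ++ [x])
  else st

-- B's loop body over (army, key) pairs
def pvStepBP (q : String → Bool)
    (st : List String × List String) (xk : String × String) : List String × List String :=
  if q xk.2 = true then
    (if st.1.contains xk.2 then st.1 else st.1 ++ [xk.2], st.2 ++ [xk.1])
  else st

-- A's first loop body equals a plain counter step
lemma pv_stepA_eq (d : PySem.Dict String Int) (c : String) :
    (if (d.get? c).isNone then d.insert c 0 else d).modify c 0 (· + 1)
    = d.modify c 0 (· + 1) := by
  by_cases h : d.get? c = none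
  · simp only [h, Option.isNone_none, if_pos]
    rw [PySem.Dict.modify.eq_1, PySem.Dict.modify.eq_1,
        PySem.Dict.getD_insert_self, PySem.Dict.insert_insert_self,
        PySem.Dict.getD_of_get?_eq_none d _ h]
  · simp [h]

-- A's dict is the counter of the normalized keys
lemma pv_dictA_eq (cs : List String) :
    cs.foldl (fun d army_city =>
      (if (d.get? (pvNormCity army_city)).isNone
        then d.insert (pvNormCity army_city) 0 else d).modify (pvNormCity army_city) 0 (· + 1))
      PySem.Dict.empty
    = PySem.Dict.counter (cs.map pvNormCity) := by
  have h1 : (fun (d : PySem.Dict String Int) army_city =>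
      (if (d.get? (pvNormCity army_city)).isNone
        then d.insert (pvNormCity army_city) 0 else d).modify (pvNormCity army_city) 0 (· + 1))
      = fun d s => d.modify (pvNormCity s) 0 (· + 1) := by
    funext d s; exact pv_stepA_eq d (pvNormCity s)
  rw [h1, PySem.Dict.counter_eq_foldl, List.foldl_map]

-- foldl Set.add from any start is append of the relative dedup
lemma pv_foldl_add_eq (l : List String) : ∀ (s : List String),
    List.foldl PySem.Set.add s l = s ++ pvDedupFrom s l := by
  induction l with
  | nil => intro s; simp [pvDedupFrom]
  | cons k ks ih =>
    intro s
    simp only [List.foldl_cons, pvDedupFrom]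
    rw [PySem.Set.add_eq_ite]
    by_cases h : k ∈ s
    · simp [h, ih s]
    · simp only [h, List.contains_eq_mem, decide_false, Bool.false_eq_true, if_neg,
        if_false, ih (s ++ [k])]
      simp [h]

-- the generic fused loop, generalized over the accumulated state
lemma pv_foldB (q : String → Bool) (f : String → String) (l : List String) :
    ∀ (cA bA seen : List String),
    (∀ k, q k = true → (k ∈ cA ↔ k ∈ seen)) →
    l.foldl (pvStepB q f) (cA, bA)
    = (cA ++ (pvDedupFrom seen (l.map f)).filter q,
       bA ++ l.filter (fun x => q (f x))) := by
  induction l with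
  | nil => intro cA bA seen _; simp [pvDedupFrom]
  | cons x xs ih =>
    intro cA bA seen hinv
    rw [List.foldl_cons]
    by_cases hq : q (f x) = true
    · by_cases hm : f x ∈ seen
      · have hstep : pvStepB q f (cA, bA) x = (cA, bA ++ [x]) := by
          simp [pvStepB, hq]
          exact (hinv (f x) hq).mpr hm
        rw [hstep, ih cA (bA ++ [x]) seen hinv]
        simp [pvDedupFrom, hm, hq, List.filter_cons]
      · have hstep : pvStepB q f (cA, bA) x = (cA ++ [f x], bA ++ [x]) := by
          simp [pvStepB, hq]
          exact fun h => hm ((hinv (f x) hq).mp h)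
        rw [hstep, ih (cA ++ [f x]) (bA ++ [x]) (seen ++ [f x])
          (by intro k hk
              simp only [List.mem_append, List.mem_singleton]
              rw [hinv k hk])]
        simp [pvDedupFrom, hm, hq, List.filter_cons]
    · have hstep : pvStepB q f (cA, bA) x = (cA, bA) := by
        simp [pvStepB, hq]
      rw [hstep]
      by_cases hm : f x ∈ seen
      · rw [ih cA bA seen hinv]
        simp [pvDedupFrom, hm, hq, List.filter_cons]
      · rw [ih cA bA (seen ++ [f x])
          (by intro k hk
              have hne : ¬ k = f x := by rintro rfl; rw [hk] at hq; exact hq rfl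
              simp only [List.mem_append, List.mem_singleton, hne, or_false]
              exact hinv k hk)]
        simp [pvDedupFrom, hm, hq, List.filter_cons]

lemma pv_zip_map (cs : List String) :
    cs.zip (cs.map pvNormCity) = cs.map (fun x => (x, pvNormCity x)) := by
  induction cs with
  | nil => simp
  | cons a t ih => simpa using ih

-- in a (≤)-sorted list, k occurs in an adjacent equal pair iff it occurs at least twice
lemma pv_adj_iff_two (k : String) (l : List String) (hp : l.Pairwise (· ≤ ·)) :
    (∃ p ∈ l.zip l.tail, p.1 = k ∧ p.2 = k) ↔ 2 ≤ l.count k := by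
  induction hp with
  | nil => simp
  | @cons a l h hp ih =>
    cases l with
    | nil => by_cases hak : a = k <;> simp [hak]
    | cons b t =>
      have hbt := (List.pairwise_cons.mp hp).1
      rw [show (a :: b :: t).zip (a :: b :: t).tail = (a, b) :: (b :: t).zip t from rfl]
      rw [show ((b :: t).zip (b :: t).tail) = (b :: t).zip t from rfl] at ih
      constructor
      · rintro ⟨p, hpmem, hk1, hk2⟩
        rcases List.mem_cons.mp hpmem with rfl | htail
        · simp only at hk1 hk2
          subst hk1; subst hk2
          rw [List.count_cons_self, List.count_cons_self]
          omega
        · exact le_trans (ih.mp ⟨p, htail, hk1, hk2⟩) (List.count_le_count_cons ..)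
      · intro hcnt
        by_cases hak : k = a
        · subst hak
          have hmem : k ∈ b :: t := by
            rw [← List.count_pos_iff]
            rw [List.count_cons_self] at hcnt
            omega
          have hbk : b = k := by
            rcases List.mem_cons.mp hmem with rfl | hkt
            · rfl
            · exact le_antisymm (hbt k hkt) (h b (by simp))
          exact ⟨(k, b), by simp, rfl, hbk⟩
        · have hcnt' : 2 ≤ List.count k (b :: t) := by
            rw [List.count_cons] at hcnt
            simp only [beq_iff_eq] at hcnt
            rw [if_neg (fun h => hak h.symm)] at hcnt
            omega
          replace hcnt := hcnt'
          obtain ⟨p, hpmem, h1, h2'⟩ := ih.mpr hcnt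
          exact ⟨p, List.mem_cons_of_mem _ hpmem, h1, h2'⟩

-- membership in B's dup set is "key occurs at least twice"
lemma pv_mem_dup_iff (keys : List String) (k : String) :
    (k ∈ PySem.Set.ofList
        ((((PySem.List.sorted keys (fun x => x) false).zip
            (PySem.List.sorted keys (fun x => x) false).tail).filter
              (fun p => p.1 == p.2)).map Prod.fst))
    ↔ 2 ≤ List.count k keys := by
  have hperm : (PySem.List.sorted keys (fun x => x) false).Perm keys :=
    PySem.List.sorted_perm keys (fun x => x) false
  have hpw : (PySem.List.sorted keys (fun x => x) false).Pairwise (· ≤ ·) := by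
    simpa using PySem.List.sorted_pairwise (xs := keys) (key := fun x => x)
  rw [PySem.Set.mem_ofList, ← hperm.count_eq, ← pv_adj_iff_two k _ hpw]
  constructor
  · intro hmem
    obtain ⟨p, hpf, hpk⟩ := List.mem_map.mp hmem
    obtain ⟨hpz, hpe⟩ := List.mem_filter.mp hpf
    exact ⟨p, hpz, hpk, by rw [← beq_iff_eq.mp hpe]; exact hpk⟩
  · rintro ⟨p, hpz, h1, h2⟩
    exact List.mem_map.mpr ⟨p, List.mem_filter.mpr ⟨hpz, by simp [h1, h2]⟩, h1⟩

-- both ports compute (filter q (ofList keys), filter (q ∘ key) cs)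
lemma pv_A_normal (cs : List String) :
    city_with_armies cs =
      ((PySem.Set.ofList (cs.map pvNormCity)).filter
          (fun k => decide ((2:Int) ≤ (List.count k (cs.map pvNormCity) : Int))),
       cs.filter (fun x => decide ((2:Int) ≤ (List.count (pvNormCity x) (cs.map pvNormCity) : Int)))) := by
  simp only [city_with_armies]
  rw [pv_dictA_eq]
  set keys := cs.map pvNormCity with hkeys
  set q : String → Bool := fun k => decide ((2:Int) ≤ (List.count k keys : Int)) with hq
  have hcities :
      (PySem.Dict.counter keys).items.foldl
        (fun acc p => if (2:Int) ≤ p.2 then acc ++ [p.1] else acc) []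
      = (PySem.Set.ofList keys).filter q := by
    rw [PySem.Dict.items_counter]
    rw [show (fun acc (p : String × Int) => if (2:Int) ≤ p.2 then acc ++ [p.1] else acc)
          = fun acc p => if (fun p : String × Int => decide ((2:Int) ≤ p.2)) p = true
              then acc ++ [Prod.fst p] else acc by
        funext acc p; simp]
    rw [PySem.List.foldl_append_if]
    rw [List.filter_map, List.map_map]
    simp only [Function.comp_def]
    simp [hq]
  rw [hcities]
  congr 1
  rw [show (fun (acc : List String) x =>
        if ((PySem.Set.ofList keys).filter q).contains (pvNormCity x) then acc ++ [x] else acc)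
      = fun (acc : List String) x =>
        if (fun y => ((PySem.Set.ofList keys).filter q).contains (pvNormCity y)) x = true
        then acc ++ [id x] else acc by
    funext acc x; simp]
  rw [PySem.List.foldl_append_if]
  simp only [List.map_id, List.nil_append]
  apply List.filter_congr
  intro x hx
  have hmemkeys : pvNormCity x ∈ keys := by
    rw [hkeys]; exact List.mem_map_of_mem hx
  by_cases h : q (pvNormCity x) = true
  · simp only [hq, decide_eq_true_eq] at h
    simp only [List.contains_eq_mem, List.mem_filter, hq, decide_eq_true_eq]
    simp [PySem.Set.mem_ofList, hmemkeys, h]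
  · simp only [hq, decide_eq_true_eq, Bool.not_eq_true, decide_eq_false_iff_not] at h
    simp only [List.contains_eq_mem, List.mem_filter, hq, decide_eq_true_eq]
    simp [h]

lemma pv_B_normal (cs : List String) :
    city_with_armies_alt cs =
      ((PySem.Set.ofList (cs.map pvNormCity)).filter
          (fun k => decide ((2:Int) ≤ (List.count k (cs.map pvNormCity) : Int))),
       cs.filter (fun x => decide ((2:Int) ≤ (List.count (pvNormCity x) (cs.map pvNormCity) : Int)))) := by
  simp only [city_with_armies_alt]
  set keys := cs.map pvNormCity with hkeys
  set q : String → Bool := fun k => decide ((2:Int) ≤ (List.count k keys : Int)) with hq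
  set sk := PySem.List.sorted keys (fun k => k) false with hsk
  set dup := PySem.Set.ofList (((sk.zip sk.tail).filter (fun p => p.1 == p.2)).map Prod.fst)
    with hdup
  have hcontains : ∀ x, PySem.Set.contains dup x = q x := by
    intro x
    have hiff : x ∈ dup ↔ (2:Int) ≤ (List.count x keys : Int) := by
      rw [hdup, hsk]
      constructor
      · intro hx; exact_mod_cast (pv_mem_dup_iff keys x).mp hx
      · intro hx; exact (pv_mem_dup_iff keys x).mpr (by exact_mod_cast hx)
    by_cases hx : x ∈ dup
    · have h1 : PySem.Set.contains dup x = true := (PySem.Set.contains_iff dup x).mpr hx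
      have h2 : (2:Int) ≤ (List.count x keys : Int) := hiff.mp hx
      rw [h1, hq]
      exact (decide_eq_true h2).symm
    · have h1 : PySem.Set.contains dup x = false := by
        cases hc : PySem.Set.contains dup x
        · rfl
        · exact absurd ((PySem.Set.contains_iff dup x).mp hc) hx
      have h2 : ¬ (2:Int) ≤ (List.count x keys : Int) := fun h => hx (hiff.mpr h)
      rw [h1, hq]
      exact (decide_eq_false h2).symm
  rw [show (fun (st : List String × List String) (xk : String × String) =>
        if PySem.Set.contains dup xk.2 then
          (if st.1.contains xk.2 then st.1 else st.1 ++ [xk.2], st.2 ++ [xk.1])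
        else st) = pvStepBP q from by
    funext st xk
    rw [hcontains xk.2]
    simp [pvStepBP]]
  have hzip : cs.zip keys = cs.map (fun x => (x, pvNormCity x)) := by
    rw [hkeys]; exact pv_zip_map cs
  rw [hzip, List.foldl_map]
  rw [show (fun (st : List String × List String) x => pvStepBP q (st) (x, pvNormCity x))
        = pvStepB q pvNormCity by
    funext st x
    simp only [pvStepBP, pvStepB]
    by_cases h : q (pvNormCity x) = true
    · simp only [h, if_pos]
      by_cases hm : pvNormCity x ∈ st.1 <;> simp [hm]
    · simp [h]]
  rw [pv_foldB q pvNormCity cs [] [] [] (by intro k _; simp)]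
  rw [PySem.Set.ofList_eq_foldl, pv_foldl_add_eq]
  simp only [List.nil_append]
  rw [← hkeys]

-- ===== VERDICT (by name: the statement is the Claim_ definition above) =====
theorem city_with_armies_spec : Claim_equal_city_with_armies := by
  intro cs _
  unfold Spec_city_with_armies
  rw [pv_A_normal, pv_B_normal]
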